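-- pv_equiv track=rewrite | github.com/FabianAlvaradoDonoso/adventofcode | python/2015/solutions/day05.py | part2
-- ===== SOURCE A (Python) =====
-- def part2(data):
--     count = 0
--     for d in data:
--         pair = False
--         repeat = False
--
--         for i in range(len(d) - 1):
--             if d.count(d[i] + d[i + 1]) > 1:
--                 pair = True
--                 break
--
--         for i in range(len(d) - 2):
--             if d[i] == d[i + 2]:
--                 repeat = True
--                 break
--
--         if pair and repeat:
--             count += 1
--
--     return count
-- ===== SOURCE B (Python) =====
-- def part2(data):
--     total = 0
--     for d in data:
--         n = len(d)
--         first = {}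
--         pair = False
--         repeat = False
--         for i in range(n - 1):
--             p = d[i:i + 2]
--             j = first.setdefault(p, i)
--             if i - j >= 2:
--                 pair = True
--             if i >= 1 and d[i - 1] == d[i + 1]:
--                 repeat = True
--         if pair and repeat:
--             total += 1
--     return total
-- ===== Notes on version B (the rewrite author's own statement) =====
-- stated objective: alternative
-- what changed: B replaces A's per-index d.count(pair) rescans and second index loop by a single pass per string that records each 2-char pair's first index in a dict and flags a repeat of a pair at gap >= 2 and an aba pattern in the same sweep; this is O(n) worst case per string versus A's O(n^2) worst case, though A's early break plus C-coded str.count makes A fast on typical random data, so no measured speed claim is made.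
import Mathlib
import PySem

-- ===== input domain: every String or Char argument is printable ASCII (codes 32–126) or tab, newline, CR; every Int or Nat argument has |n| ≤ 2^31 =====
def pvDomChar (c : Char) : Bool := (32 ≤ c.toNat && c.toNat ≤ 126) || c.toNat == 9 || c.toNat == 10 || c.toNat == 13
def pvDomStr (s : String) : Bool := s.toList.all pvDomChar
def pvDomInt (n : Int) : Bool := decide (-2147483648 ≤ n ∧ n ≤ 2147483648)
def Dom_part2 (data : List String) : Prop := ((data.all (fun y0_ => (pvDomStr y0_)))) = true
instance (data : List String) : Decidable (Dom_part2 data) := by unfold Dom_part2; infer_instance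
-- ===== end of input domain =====

-- B replaces A's per-index `d.count(pair) > 1` rescans by one pass per string that records each
-- 2-char pair's first index in a dict and flags a repetition at gap ≥ 2 (alternative algorithm,
-- same return value on every input).

-- ===== PORT A =====
-- inner loop `for i in range(len(d)-1): if d.count(d[i]+d[i+1]) > 1: pair = True; break`
-- (`.any` short-circuits exactly like the break; indices are in range, so pyGetD's default is never read)
def aPair (cs : List Char) : Bool :=
  (PySem.List.pyRange 0 ((cs.length : Int) - 1)).any (fun i =>
    decide (1 < PySem.Chars.count cs
      [PySem.List.pyGetD cs i 'a', PySem.List.pyGetD cs (i + 1) 'a']))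

-- inner loop `for i in range(len(d)-2): if d[i] == d[i+2]: repeat = True; break`
def aRep (cs : List Char) : Bool :=
  (PySem.List.pyRange 0 ((cs.length : Int) - 2)).any (fun i =>
    PySem.List.pyGetD cs i 'a' == PySem.List.pyGetD cs (i + 2) 'a')

def part2 (data : List String) : Int :=
  data.foldl (fun count d =>
    if aPair d.toList && aRep d.toList then count + 1 else count) 0

-- ===== PORT B =====
-- one iteration of B's single pass: state = (first-index dict, pair flag, repeat flag)
def bStep (cs : List Char) (st : PySem.Dict (List Char) Int × Bool × Bool) (i : Int) :
    PySem.Dict (List Char) Int × Bool × Bool :=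
  let p := PySem.List.slice cs (some i) (some (i + 2))
  let j := (st.1.get? p).getD i          -- j = first.setdefault(p, i)
  let first := st.1.setdefault p i
  let pair := if 2 ≤ i - j then true else st.2.1
  let rep := if (1 ≤ i) &&
      (PySem.List.pyGetD cs (i - 1) 'a' == PySem.List.pyGetD cs (i + 1) 'a')
    then true else st.2.2
  (first, pair, rep)

def part2_alt (data : List String) : Int :=
  data.foldl (fun total d =>
    let cs := d.toList
    let st := (PySem.List.pyRange 0 ((cs.length : Int) - 1)).foldl (bStep cs)
      (PySem.Dict.empty, false, false)
    if st.2.1 && st.2.2 then total + 1 else total) 0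

-- ===== PRECONDITION & SPEC =====
def Spec_part2 (data : List String) (out : Int) : Prop := out = part2_alt data
instance (data : List String) (out : Int) : Decidable (Spec_part2 data out) := by unfold Spec_part2; infer_instance

-- ===== CLAIM (what is proved, stated in full; the proofs are below) =====
def Claim_equal_part2 : Prop := ∀ (data : List String), Dom_part2 data → Spec_part2 data (part2 data)

-- ===== LEMMAS AND PROOFS =====

-- `Occ c1 c2 cs j`: the two-char string c1c2 occurs in cs at index j
def Occ (c1 c2 : Char) (cs : List Char) (j : Nat) : Prop :=
  cs[j]? = some c1 ∧ cs[j + 1]? = some c2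

-- the mathematical content of both pair tests: some pair occurs twice at distance ≥ 2
def PairPos (cs : List Char) : Prop :=
  ∃ j i c1 c2, j + 2 ≤ i ∧ Occ c1 c2 cs j ∧ Occ c1 c2 cs i

-- the content of both repeat tests
def RepPos (cs : List Char) : Prop :=
  ∃ m, m + 3 ≤ cs.length ∧ cs.getD m 'a' = cs.getD (m + 2) 'a'

-- structural form of CPython's greedy non-overlapping substring count for a 2-char needle
def cnt2 (c1 c2 : Char) : List Char → Nat
  | [] => 0
  | [_] => 0
  | a :: b :: t => if a == c1 && b == c2 then cnt2 c1 c2 t + 1 else cnt2 c1 c2 (b :: t)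

theorem go_succ_cons (c1 c2 : Char) (fuel acc : Nat) (a : Char) (t : List Char) :
    PySem.Chars.count.go [c1, c2] (fuel + 1) (a :: t) acc =
      (if [c1, c2].isPrefixOf (a :: t) then
        PySem.Chars.count.go [c1, c2] fuel (List.drop 2 (a :: t)) (acc + 1)
      else PySem.Chars.count.go [c1, c2] fuel t acc) := by
  rw [PySem.Chars.count.go.eq_def]; rfl

theorem go_nil (c1 c2 : Char) (fuel acc : Nat) :
    PySem.Chars.count.go [c1, c2] fuel [] acc = acc := by
  rw [PySem.Chars.count.go.eq_def]; cases fuel <;> rfl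

theorem go_eq_cnt2 (c1 c2 : Char) (fuel : Nat) (l : List Char) (acc : Nat)
    (h : l.length ≤ fuel) :
    PySem.Chars.count.go [c1, c2] fuel l acc = acc + cnt2 c1 c2 l := by
  induction fuel generalizing l acc with
  | zero =>
    have : l = [] := List.length_eq_zero_iff.mp (Nat.le_zero.mp h)
    subst this
    simp [go_nil, cnt2]
  | succ fuel ih =>
    match l with
    | [] => simp [go_nil, cnt2]
    | [a] =>
      rw [go_succ_cons]
      have hpre : [c1, c2].isPrefixOf [a] = false := by
        simp [List.isPrefixOf]
      simp [hpre, go_nil, cnt2]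
    | a :: b :: t =>
      rw [go_succ_cons]
      have hpre : [c1, c2].isPrefixOf (a :: b :: t) = ((a == c1) && (b == c2)) := by
        simp [List.isPrefixOf, Bool.beq_comm]
      rw [hpre]
      simp only [List.length_cons] at h
      by_cases hab : ((a == c1) && (b == c2)) = true
      · rw [if_pos hab, show List.drop 2 (a :: b :: t) = t from rfl,
          ih t (acc + 1) (by omega), cnt2, if_pos hab]
        omega
      · rw [if_neg hab, ih (b :: t) acc (by simp only [List.length_cons]; omega),
          cnt2, if_neg hab]

theorem count_eq_cnt2 (c1 c2 : Char) (cs : List Char) :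
    PySem.Chars.count cs [c1, c2] = cnt2 c1 c2 cs := by
  have : PySem.Chars.count cs [c1, c2] = PySem.Chars.count.go [c1, c2] cs.length cs 0 := by
    simp [PySem.Chars.count]
  rw [this, go_eq_cnt2 c1 c2 cs.length cs 0 (le_refl _)]
  omega

theorem occ_cons (c1 c2 a : Char) (cs : List Char) (j : Nat) :
    Occ c1 c2 (a :: cs) (j + 1) ↔ Occ c1 c2 cs j := by
  simp [Occ]

theorem occ_nil (c1 c2 : Char) (j : Nat) : ¬ Occ c1 c2 [] j := by
  simp [Occ]

theorem occ_singleton (c1 c2 x : Char) (j : Nat) : ¬ Occ c1 c2 [x] j := by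
  rintro ⟨h1, h2⟩
  have := (List.getElem?_eq_some_iff.mp h2).1
  simp at this

theorem one_le_cnt2 (c1 c2 : Char) (cs : List Char) :
    1 ≤ cnt2 c1 c2 cs ↔ ∃ j, Occ c1 c2 cs j := by
  fun_induction cnt2 c1 c2 cs with
  | case1 => simp [occ_nil]
  | case2 x => simp [occ_singleton]
  | case3 a b t hab ih =>
    rw [Bool.and_eq_true, beq_iff_eq, beq_iff_eq] at hab
    exact iff_of_true (by omega) ⟨0, by simp [Occ, hab.1, hab.2]⟩
  | case4 a b t hab ih =>
    rw [ih]
    constructor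
    · rintro ⟨j, hj⟩
      exact ⟨j + 1, (occ_cons c1 c2 a (b :: t) j).mpr hj⟩
    · rintro ⟨j, hj⟩
      match j with
      | 0 =>
        exfalso
        apply hab
        obtain ⟨h1, h2⟩ := hj
        simp only [List.getElem?_cons_zero, Option.some.injEq] at h1
        simp only [List.getElem?_cons_succ, List.getElem?_cons_zero,
          Option.some.injEq] at h2
        rw [Bool.and_eq_true, beq_iff_eq, beq_iff_eq]
        exact ⟨h1, h2⟩
      | j + 1 =>
        exact ⟨j, (occ_cons c1 c2 a (b :: t) j).mp hj⟩

theorem two_le_cnt2 (c1 c2 : Char) (cs : List Char) :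
    2 ≤ cnt2 c1 c2 cs ↔ ∃ j i, j + 2 ≤ i ∧ Occ c1 c2 cs j ∧ Occ c1 c2 cs i := by
  fun_induction cnt2 c1 c2 cs with
  | case1 => simp [occ_nil]
  | case2 x => simp [occ_singleton]
  | case3 a b t hab ih =>
    have hab' := hab
    rw [Bool.and_eq_true, beq_iff_eq, beq_iff_eq] at hab'
    have hocc0 : Occ c1 c2 (a :: b :: t) 0 := by simp [Occ, hab'.1, hab'.2]
    constructor
    · intro h
      have ht : 1 ≤ cnt2 c1 c2 t := by omega
      obtain ⟨j, hj⟩ := (one_le_cnt2 c1 c2 t).mp ht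
      refine ⟨0, j + 2, by omega, hocc0, ?_⟩
      exact (occ_cons c1 c2 a (b :: t) (j + 1)).mpr ((occ_cons c1 c2 b t j).mpr hj)
    · rintro ⟨j, i, hji, _, hoi⟩
      have hi2 : 2 ≤ i := by omega
      match i, hi2 with
      | i + 2, _ =>
        have : Occ c1 c2 t i :=
          (occ_cons c1 c2 b t i).mp ((occ_cons c1 c2 a (b :: t) (i + 1)).mp hoi)
        have : 1 ≤ cnt2 c1 c2 t := (one_le_cnt2 c1 c2 t).mpr ⟨i, this⟩
        omega
  | case4 a b t hab ih =>
    rw [ih]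
    constructor
    · rintro ⟨j, i, hji, hoj, hoi⟩
      exact ⟨j + 1, i + 1, by omega, (occ_cons c1 c2 a (b :: t) j).mpr hoj,
        (occ_cons c1 c2 a (b :: t) i).mpr hoi⟩
    · rintro ⟨j, i, hji, hoj, hoi⟩
      match j with
      | 0 =>
        exfalso
        apply hab
        obtain ⟨h1, h2⟩ := hoj
        simp only [List.getElem?_cons_zero, Option.some.injEq] at h1
        simp only [List.getElem?_cons_succ, List.getElem?_cons_zero,
          Option.some.injEq] at h2
        rw [Bool.and_eq_true, beq_iff_eq, beq_iff_eq]
        exact ⟨h1, h2⟩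
      | j + 1 =>
        have hi1 : 1 ≤ i := by omega
        match i, hi1 with
        | i + 1, _ =>
          exact ⟨j, i, by omega, (occ_cons c1 c2 a (b :: t) j).mp hoj,
            (occ_cons c1 c2 a (b :: t) i).mp hoi⟩

theorem getD_of_occ_left {c1 c2 : Char} {cs : List Char} {j : Nat} (h : Occ c1 c2 cs j) :
    cs.getD j 'a' = c1 := by
  rw [List.getD_eq_getElem?_getD, h.1]; rfl

theorem getD_of_occ_right {c1 c2 : Char} {cs : List Char} {j : Nat} (h : Occ c1 c2 cs j) :
    cs.getD (j + 1) 'a' = c2 := by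
  rw [List.getD_eq_getElem?_getD, h.2]; rfl

-- A's pair loop decides PairPos
theorem aPair_iff (cs : List Char) : aPair cs = true ↔ PairPos cs := by
  unfold aPair
  rw [List.any_eq_true]
  constructor
  · rintro ⟨i, _, hcond⟩
    rw [decide_eq_true_iff] at hcond
    set x := PySem.List.pyGetD cs i 'a'
    set y := PySem.List.pyGetD cs (i + 1) 'a'
    rw [count_eq_cnt2] at hcond
    obtain ⟨j, i', hji, hoj, hoi⟩ := (two_le_cnt2 x y cs).mp (by omega)
    exact ⟨j, i', x, y, hji, hoj, hoi⟩
  · rintro ⟨j, i, c1, c2, hji, hoj, hoi⟩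
    have hjlen : j + 2 ≤ cs.length := by
      have := (List.getElem?_eq_some_iff.mp hoj.2).1; omega
    have hilen : i + 2 ≤ cs.length := by
      have := (List.getElem?_eq_some_iff.mp hoi.2).1; omega
    refine ⟨(j : Int), ?_, ?_⟩
    · rw [PySem.List.mem_pyRange_one]
      constructor
      · exact Int.natCast_nonneg j
      · omega
    · rw [decide_eq_true_iff]
      have h1 : PySem.List.pyGetD cs (j : Int) 'a' = c1 := by
        rw [PySem.List.pyGetD_natCast, getD_of_occ_left hoj]
      have h2 : PySem.List.pyGetD cs ((j : Int) + 1) 'a' = c2 := by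
        rw [show ((j : Int) + 1) = ((j + 1 : Nat) : Int) by push_cast; ring,
          PySem.List.pyGetD_natCast, getD_of_occ_right hoj]
      rw [h1, h2, count_eq_cnt2]
      have := (two_le_cnt2 c1 c2 cs).mpr ⟨j, i, hji, hoj, hoi⟩
      omega

-- A's repeat loop decides RepPos
theorem aRep_iff (cs : List Char) : aRep cs = true ↔ RepPos cs := by
  unfold aRep
  rw [List.any_eq_true]
  constructor
  · rintro ⟨i, hmem, hcond⟩
    rw [PySem.List.mem_pyRange_one] at hmem
    obtain ⟨h0, hlt⟩ := hmem
    have hk : i = ((i.toNat : Nat) : Int) := by omega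
    rw [hk, show ((i.toNat : Nat) : Int) + 2 = ((i.toNat + 2 : Nat) : Int) by push_cast; ring,
      PySem.List.pyGetD_natCast, PySem.List.pyGetD_natCast, beq_iff_eq] at hcond
    exact ⟨i.toNat, by omega, hcond⟩
  · rintro ⟨m, hm, heq⟩
    refine ⟨(m : Int), ?_, ?_⟩
    · rw [PySem.List.mem_pyRange_one]
      exact ⟨Int.natCast_nonneg m, by omega⟩
    · rw [show ((m : Int) + 2) = ((m + 2 : Nat) : Int) by push_cast; ring,
        PySem.List.pyGetD_natCast, PySem.List.pyGetD_natCast, beq_iff_eq]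
      exact heq

-- the pair of characters starting at index j (B's dict key d[i:i+2])
def pairAt (cs : List Char) (j : Nat) : List Char := (cs.drop j).take 2

theorem occ_iff_pairAt (c1 c2 : Char) (cs : List Char) (j : Nat) (h : j + 2 ≤ cs.length) :
    Occ c1 c2 cs j ↔ pairAt cs j = [c1, c2] := by
  induction cs generalizing j with
  | nil => simp at h
  | cons a t ih =>
    match j with
    | 0 =>
      match t with
      | [] => simp at h
      | b :: t' => simp [Occ, pairAt]
    | j + 1 =>
      rw [occ_cons]
      simp only [List.length_cons] at h
      rw [ih j (by omega)]
      simp [pairAt]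

theorem pairAt_full (cs : List Char) (j : Nat) (h : j + 2 ≤ cs.length) :
    ∃ c1 c2, pairAt cs j = [c1, c2] := by
  have hlen : (pairAt cs j).length = 2 := by
    simp [pairAt]; omega
  exact List.length_eq_two.mp hlen

theorem pairPos_iff_pairAt (cs : List Char) :
    PairPos cs ↔ ∃ j i, j + 2 ≤ i ∧ i + 2 ≤ cs.length ∧ pairAt cs j = pairAt cs i := by
  constructor
  · rintro ⟨j, i, c1, c2, hji, hoj, hoi⟩
    have hilen : i + 2 ≤ cs.length := by
      have := (List.getElem?_eq_some_iff.mp hoi.2).1; omega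
    have hjlen : j + 2 ≤ cs.length := by omega
    refine ⟨j, i, hji, hilen, ?_⟩
    rw [(occ_iff_pairAt c1 c2 cs j hjlen).mp hoj, (occ_iff_pairAt c1 c2 cs i hilen).mp hoi]
  · rintro ⟨j, i, hji, hilen, heq⟩
    have hjlen : j + 2 ≤ cs.length := by omega
    obtain ⟨c1, c2, hc⟩ := pairAt_full cs j hjlen
    exact ⟨j, i, c1, c2, hji, (occ_iff_pairAt c1 c2 cs j hjlen).mpr hc,
      (occ_iff_pairAt c1 c2 cs i hilen).mpr (by rw [← heq, hc])⟩

-- find? over List.range returns the least index satisfying the test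
theorem find?_range_least {f : Nat → Bool} {k j : Nat}
    (h : (List.range k).find? f = some j) :
    j < k ∧ f j = true ∧ ∀ j' < j, f j' = false := by
  induction k with
  | zero => simp at h
  | succ k ih =>
    rw [List.range_succ, List.find?_append] at h
    cases hk : (List.range k).find? f with
    | some j0 =>
      rw [hk, Option.some_or] at h
      obtain rfl : j0 = j := by injection h
      obtain ⟨h1, h2, h3⟩ := ih hk
      exact ⟨by omega, h2, h3⟩
    | none =>
      rw [hk, Option.none_or] at h
      simp only [List.find?_cons, List.find?_nil] at h
      by_cases hf : f k = true
      · rw [hf] at h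
        simp only at h
        obtain rfl : k = j := by injection h
        refine ⟨by omega, hf, fun j' hj' => ?_⟩
        have := List.find?_eq_none.mp hk
        by_contra hne
        exact this j' (List.mem_range.mpr hj') (by simpa using hne)
      · rw [Bool.not_eq_true] at hf
        rw [hf] at h
        simp at h
  
-- invariant of B's single pass after k iterations
def BInv (cs : List Char) (k : Nat) (st : PySem.Dict (List Char) Int × Bool × Bool) : Prop :=
  (∀ p, st.1.get? p =
      ((List.range k).find? (fun j => pairAt cs j == p)).map Int.ofNat) ∧
  (st.2.1 = true ↔ ∃ j i, i < k ∧ j + 2 ≤ i ∧ pairAt cs j = pairAt cs i) ∧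
  (st.2.2 = true ↔ ∃ m, m + 1 < k ∧ cs.getD m 'a' = cs.getD (m + 2) 'a')

theorem slice_pairAt (cs : List Char) (k : Nat) :
    PySem.List.slice cs (some (k : Int)) (some ((k : Int) + 2)) = pairAt cs k := by
  rw [show ((k : Int) + 2) = ((k + 2 : Nat) : Int) by push_cast; ring,
    PySem.List.slice_natCast]
  simp [pairAt]

theorem bInv_step (cs : List Char) (k : Nat) (st : PySem.Dict (List Char) Int × Bool × Bool)
    (hinv : BInv cs k st) :
    BInv cs (k + 1) (bStep cs st (k : Int)) := by
  obtain ⟨hd, hp, hr⟩ := hinv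
  obtain ⟨first, pair, rep⟩ := st
  simp only at hd hp hr
  unfold bStep
  simp only [slice_pairAt]
  refine ⟨?_, ?_, ?_⟩
  -- dict component
  · intro q
    simp only
    rw [List.range_succ, List.find?_append]
    by_cases hq : q = pairAt cs k
    · subst hq
      rw [PySem.Dict.get?_setdefault_self, hd]
      cases hk : (List.range k).find? (fun j => pairAt cs j == pairAt cs k) with
      | some j0 => simp
      | none => simp
    · rw [PySem.Dict.get?_setdefault_of_ne _ _ hq]
      rw [hd]
      have : (fun j => pairAt cs j == q) k = false := by
        simp; exact fun h => hq h.symm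
      simp [this]
  -- pair flag
  · simp only
    split_ifs with hcond
    · simp only [true_iff]
      -- the gap condition fired: extract the first-occurrence witness
      cases hk : first.get? (pairAt cs k) with
      | none =>
        rw [hk] at hcond
        simp only [Option.getD_none] at hcond
        omega
      | some v =>
        rw [hk] at hcond
        simp only [Option.getD_some] at hcond
        rw [hd] at hk
        cases hfind : (List.range k).find? (fun j => pairAt cs j == pairAt cs k) with
        | none =>
          rw [hfind] at hk
          exact absurd hk (by simp)
        | some jf =>
          rw [hfind] at hk
          simp only [Option.map_some] at hk
          obtain rfl : v = (jf : Int) := by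
            injection hk with hk'
            rw [← hk', Int.ofNat_eq_natCast]
          obtain ⟨hjf_lt, hjf_eq, _⟩ := find?_range_least hfind
          rw [beq_iff_eq] at hjf_eq
          exact ⟨jf, k, by omega, by omega, hjf_eq⟩
    · rw [hp]
      constructor
      · rintro ⟨j, i, hik, hji, heq⟩
        exact ⟨j, i, by omega, hji, heq⟩
      · rintro ⟨j, i, hik, hji, heq⟩
        by_cases hik' : i < k
        · exact ⟨j, i, hik', hji, heq⟩
        · have hik2 : i = k := by omega
          rw [hik2] at hji heq
          exfalso
          -- the condition must have fired: j witnesses an earlier occurrence of pairAt cs k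
          have hfj : (fun j' => pairAt cs j' == pairAt cs k) j = true := by
            simp [heq]
          cases hfind : (List.range k).find? (fun j' => pairAt cs j' == pairAt cs k) with
          | none =>
            exact absurd hfj (by
              simpa using List.find?_eq_none.mp hfind j (List.mem_range.mpr (by omega)))
          | some jf =>
            obtain ⟨hjf_lt, _, hjf_min⟩ := find?_range_least hfind
            have hjfj : jf ≤ j := by
              by_contra hlt
              exact absurd hfj (by simp [hjf_min j (by omega)])
            apply hcond
            rw [hd, hfind]
            simp only [Option.map_some, Option.getD_some, Int.ofNat_eq_natCast]
            omega
  -- repeat flag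
  · simp only
    split_ifs with hcond
    · simp only [true_iff]
      rw [Bool.and_eq_true, decide_eq_true_iff] at hcond
      obtain ⟨h1, h2⟩ := hcond
      have hk1 : 1 ≤ k := by exact_mod_cast h1
      rw [beq_iff_eq] at h2
      refine ⟨k - 1, by omega, ?_⟩
      rw [show ((k : Int) - 1) = ((k - 1 : Nat) : Int) by omega,
        show ((k : Int) + 1) = ((k - 1 + 2 : Nat) : Int) by omega,
        PySem.List.pyGetD_natCast, PySem.List.pyGetD_natCast] at h2
      exact h2
    · rw [hr]
      constructor
      · rintro ⟨m, hm, heq⟩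
        exact ⟨m, by omega, heq⟩
      · rintro ⟨m, hm, heq⟩
        by_cases hm' : m + 1 < k
        · exact ⟨m, hm', heq⟩
        · obtain rfl : m = k - 1 := by omega
          have hk1 : 1 ≤ k := by omega
          exfalso
          apply hcond
          rw [Bool.and_eq_true, decide_eq_true_iff]
          refine ⟨by exact_mod_cast hk1, ?_⟩
          rw [show ((k : Int) - 1) = ((k - 1 : Nat) : Int) by omega,
            show ((k : Int) + 1) = ((k - 1 + 2 : Nat) : Int) by omega,
            PySem.List.pyGetD_natCast, PySem.List.pyGetD_natCast, beq_iff_eq]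
          exact heq

theorem bInv_fold (cs : List Char) (k : Nat) :
    BInv cs k (((List.range k).map Int.ofNat).foldl (bStep cs)
      (PySem.Dict.empty, false, false)) := by
  induction k with
  | zero =>
    refine ⟨fun p => by simp [PySem.Dict.get?_empty], by simp, by simp⟩
  | succ k ih =>
    rw [List.range_succ, List.map_append, List.foldl_append]
    exact bInv_step cs k _ ih

-- B's flags decide PairPos and RepPos
theorem bFlags_iff (cs : List Char) :
    ((PySem.List.pyRange 0 ((cs.length : Int) - 1)).foldl (bStep cs)
      (PySem.Dict.empty, false, false)).2.1 = true ↔ PairPos cs := by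
  cases cs with
  | nil =>
    rw [show PySem.List.pyRange 0 ((([] : List Char).length : Int) - 1) = [] from by decide]
    simp only [List.foldl_nil]
    constructor
    · intro h; simp at h
    · rintro ⟨j, i, c1, c2, _, hoj, _⟩
      exact absurd hoj (occ_nil c1 c2 j)
  | cons a t =>
    have hcast : (((a :: t).length : Int) - 1) = ((t.length : Nat) : Int) := by
      simp only [List.length_cons]; push_cast; ring
    rw [hcast, show PySem.List.pyRange 0 ((t.length : Nat) : Int) =
      (List.range t.length).map Int.ofNat from by
        rw [PySem.List.pyRange_zero_natCast]; rfl]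
    obtain ⟨_, hp, _⟩ := bInv_fold (a :: t) t.length
    rw [hp, pairPos_iff_pairAt]
    constructor
    · rintro ⟨j, i, hik, hji, heq⟩
      exact ⟨j, i, hji, by simp only [List.length_cons]; omega, heq⟩
    · rintro ⟨j, i, hji, hlen, heq⟩
      simp only [List.length_cons] at hlen
      exact ⟨j, i, by omega, hji, heq⟩

theorem bFlags_iff_rep (cs : List Char) :
    ((PySem.List.pyRange 0 ((cs.length : Int) - 1)).foldl (bStep cs)
      (PySem.Dict.empty, false, false)).2.2 = true ↔ RepPos cs := by
  cases cs with
  | nil =>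
    rw [show PySem.List.pyRange 0 ((([] : List Char).length : Int) - 1) = [] from by decide]
    simp only [List.foldl_nil]
    constructor
    · intro h; simp at h
    · rintro ⟨m, hm, _⟩
      simp at hm
  | cons a t =>
    have hcast : (((a :: t).length : Int) - 1) = ((t.length : Nat) : Int) := by
      simp only [List.length_cons]; push_cast; ring
    rw [hcast, show PySem.List.pyRange 0 ((t.length : Nat) : Int) =
      (List.range t.length).map Int.ofNat from by
        rw [PySem.List.pyRange_zero_natCast]; rfl]
    obtain ⟨_, _, hr⟩ := bInv_fold (a :: t) t.length
    rw [hr]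
    constructor
    · rintro ⟨m, hm, heq⟩
      exact ⟨m, by simp only [List.length_cons]; omega, heq⟩
    · rintro ⟨m, hm, heq⟩
      simp only [List.length_cons] at hm
      exact ⟨m, by omega, heq⟩

theorem flags_eq (cs : List Char) :
    (aPair cs && aRep cs) =
      (let st := (PySem.List.pyRange 0 ((cs.length : Int) - 1)).foldl (bStep cs)
        (PySem.Dict.empty, false, false)
       st.2.1 && st.2.2) := by
  simp only
  congr 1
  · rw [Bool.eq_iff_iff, aPair_iff, bFlags_iff]
  · rw [Bool.eq_iff_iff, aRep_iff, bFlags_iff_rep]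

-- ===== VERDICT (by name: the statement is the Claim_ definition above) =====
theorem part2_spec : Claim_equal_part2 := by
  intro data _
  show part2 data = part2_alt data
  unfold part2 part2_alt
  exact List.foldl_ext _ _ 0 (fun acc d _ => by rw [flags_eq])
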